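-- pv_equiv track=rewrite | github.com/duksung-cybersecurity-cypherpunk/Newstrike | Newsletter/inference.py | split_title_and_content
-- ===== SOURCE A (Python) =====
-- def split_title_and_content(text):
--   first_start_index = -1
--   fourth_start_index = -1
--   star_count = 0
--
--   for index, char in enumerate(text):
--     if char == "*":
--       star_count += 1
--       if star_count == 1:
--         first_start_index = index
--       elif star_count == 4:
--         fourth_start_index = index
--         break
--
--   title = text[first_start_index:fourth_start_index+1]
--   content = text[fourth_start_index+1:]
--   return title, content
-- ===== SOURCE B (Python) =====
-- def split_title_and_content(text):
--   # Peel the text apart with str.partition instead of scanning char-by-char: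
--   # title is everything from the first '*' through the fourth '*', else ''.
--   pre, star, rest = text.partition('*')
--   if not star:
--     return '', text
--   seg = '*'
--   for _ in range(3):
--     mid, star, rest = rest.partition('*')
--     if not star:
--       return '', text
--     seg += mid + '*'
--   return seg, rest
-- ===== Notes on version B (the rewrite author's own statement) =====
-- stated objective: idiomatic
-- what changed: Replaces the manual enumerate loop with its star counter and index sentinels by three-and-one str.partition peels that build the title directly, with no index arithmetic or sentinel slicing.
import Mathlib
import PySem

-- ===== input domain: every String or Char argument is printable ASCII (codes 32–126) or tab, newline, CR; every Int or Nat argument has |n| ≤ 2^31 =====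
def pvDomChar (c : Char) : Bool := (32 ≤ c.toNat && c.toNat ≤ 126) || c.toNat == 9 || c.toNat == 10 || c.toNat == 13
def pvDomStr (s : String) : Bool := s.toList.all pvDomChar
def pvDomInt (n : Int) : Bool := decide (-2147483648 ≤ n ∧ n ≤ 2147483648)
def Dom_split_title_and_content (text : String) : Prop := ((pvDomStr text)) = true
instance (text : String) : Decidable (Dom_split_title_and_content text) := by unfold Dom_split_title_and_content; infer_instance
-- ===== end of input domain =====

-- B replaces A's manual enumerate loop (star counter + index sentinels + slicing) by
-- three-and-one str.partition peels that build the title directly; objective: idiomatic, same cost.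

-- ===== PORT A =====
-- the enumerate loop of A: state (index, first_start_index, fourth_start_index, star_count);
-- returns (first_start_index, fourth_start_index), returning early on the 'break'
def loopA : List Char → Int → Int → Int → Int → Int × Int
  | [], _, f1, f4, _ => (f1, f4)
  | c :: rest, i, f1, f4, sc =>
    if c = '*' then
      if sc + 1 = 1 then loopA rest (i + 1) i f4 (sc + 1)
      else if sc + 1 = 4 then (f1, i)
      else loopA rest (i + 1) f1 f4 (sc + 1)
    else loopA rest (i + 1) f1 f4 sc

def split_title_and_content (text : String) : String × String :=
  let r := loopA text.toList 0 (-1) (-1) 0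
  (PySem.Str.slice text (some r.1) (some (r.2 + 1)), PySem.Str.slice text (some (r.2 + 1)) none)

-- ===== PORT B =====
-- hand port of Python's str.partition('*') (single-char separator): exact —
-- (head, found?, tail); when '*' is absent Python returns (text, '', ''), i.e. found? = false
def pyPartitionStar : List Char → List Char × Bool × List Char
  | [] => ([], false, [])
  | c :: t =>
    if c = '*' then ([], true, t)
    else
      let r := pyPartitionStar t
      if r.2.1 then (c :: r.1, true, r.2.2) else (c :: t, false, [])

-- the 'for _ in range(3)' loop of Source B: peels one '*' per step, none = early 'return "", text'
def altGo : Nat → List Char → List Char → Option (List Char × List Char)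
  | 0, seg, rest => some (seg, rest)
  | n + 1, seg, rest =>
    let p := pyPartitionStar rest
    if p.2.1 then altGo n (seg ++ p.1 ++ ['*']) p.2.2 else none

def split_title_and_content_alt (text : String) : String × String :=
  let p := pyPartitionStar text.toList
  if p.2.1 then
    match altGo 3 ['*'] p.2.2 with
    | some (seg, rest) => (String.ofList seg, String.ofList rest)
    | none => ("", text)
  else ("", text)

-- ===== PRECONDITION & SPEC =====
def Spec_split_title_and_content (text : String) (out : String × String) : Prop := out = split_title_and_content_alt text
instance (text : String) (out : String × String) : Decidable (Spec_split_title_and_content text out) := by unfold Spec_split_title_and_content; infer_instance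

-- ===== CLAIM (what is proved, stated in full; the proofs are below) =====
def Claim_equal_split_title_and_content : Prop := ∀ (text : String), Dom_split_title_and_content text → Spec_split_title_and_content text (split_title_and_content text)

-- ===== LEMMAS AND PROOFS =====

-- A's loop walks star-free prefixes without changing its accumulators
theorem loopA_skip (p : List Char) (hp : '*' ∉ p) :
    ∀ (rest : List Char) (i f1 f4 sc : Int),
      loopA (p ++ rest) i f1 f4 sc = loopA rest (i + p.length) f1 f4 sc := by
  induction p with
  | nil => intro rest i f1 f4 sc; simp
  | cons c p ih =>
    intro rest i f1 f4 sc
    have hc : c ≠ '*' := fun h => hp (h ▸ List.mem_cons_self)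
    have hp' : '*' ∉ p := fun h => hp (List.mem_cons_of_mem _ h)
    simp only [List.cons_append, loopA, if_neg hc, ih hp']
    have harg : i + 1 + (p.length : Int) = i + ((c :: p).length : Int) := by
      simp [List.length_cons]; ring
    rw [harg]

theorem partition_no_star (cs : List Char) (h : '*' ∉ cs) :
    pyPartitionStar cs = (cs, false, []) := by
  induction cs with
  | nil => rfl
  | cons c t ih =>
    have hc : c ≠ '*' := fun he => h (he ▸ List.mem_cons_self)
    have ht : '*' ∉ t := fun hm => h (List.mem_cons_of_mem _ hm)
    simp [pyPartitionStar, hc, ih ht]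

theorem partition_star (p t : List Char) (hp : '*' ∉ p) :
    pyPartitionStar (p ++ '*' :: t) = (p, true, t) := by
  induction p with
  | nil => simp [pyPartitionStar]
  | cons c q ih =>
    have hc : c ≠ '*' := fun he => hp (he ▸ List.mem_cons_self)
    have hq : '*' ∉ q := fun hm => hp (List.mem_cons_of_mem _ hm)
    simp [pyPartitionStar, hc, ih hq]

theorem exists_decomp (cs : List Char) (h : '*' ∈ cs) :
    ∃ p t, '*' ∉ p ∧ cs = p ++ '*' :: t := by
  induction cs with
  | nil => cases h
  | cons c rest ih =>
    by_cases hc : c = '*'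
    · exact ⟨[], rest, by simp, by simp [hc]⟩
    · have h' : '*' ∈ rest := by
        rcases List.mem_cons.mp h with h | h
        · exact absurd h.symm hc
        · exact h
      rcases ih h' with ⟨p, t, hp, he⟩
      exact ⟨c :: p, t, by simp [hp, Ne.symm hc], by simp [he]⟩

-- one step of A's loop at a star, for each star_count A can be in
theorem loopA_star0 (t : List Char) (i f1 f4 : Int) :
    loopA ('*' :: t) i f1 f4 0 = loopA t (i + 1) i f4 1 := by norm_num [loopA]

theorem loopA_star1 (t : List Char) (i f1 f4 : Int) :
    loopA ('*' :: t) i f1 f4 1 = loopA t (i + 1) f1 f4 2 := by norm_num [loopA]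

theorem loopA_star2 (t : List Char) (i f1 f4 : Int) :
    loopA ('*' :: t) i f1 f4 2 = loopA t (i + 1) f1 f4 3 := by norm_num [loopA]

theorem loopA_star3 (t : List Char) (i f1 f4 : Int) :
    loopA ('*' :: t) i f1 f4 3 = (f1, i) := by norm_num [loopA]

-- A's loop ends with its accumulators when no star remains
theorem loopA_done (cs : List Char) (h : '*' ∉ cs) (i f1 f4 sc : Int) :
    loopA cs i f1 f4 sc = (f1, f4) := by
  have := loopA_skip cs h [] i f1 f4 sc
  simpa [loopA] using this

-- B's loop: one successful peel / the failing peel / exhaustion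
theorem altGo_step (n : Nat) (seg p t : List Char) (hp : '*' ∉ p) :
    altGo (n + 1) seg (p ++ '*' :: t) = altGo n (seg ++ p ++ ['*']) t := by
  show (if (pyPartitionStar (p ++ '*' :: t)).2.1 then
          altGo n (seg ++ (pyPartitionStar (p ++ '*' :: t)).1 ++ ['*']) (pyPartitionStar (p ++ '*' :: t)).2.2
        else none) = altGo n (seg ++ p ++ ['*']) t
  rw [partition_star _ _ hp]
  simp

theorem altGo_stop (n : Nat) (seg t : List Char) (h : '*' ∉ t) :
    altGo (n + 1) seg t = none := by
  show (if (pyPartitionStar t).2.1 then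
          altGo n (seg ++ (pyPartitionStar t).1 ++ ['*']) (pyPartitionStar t).2.2
        else none) = none
  rw [partition_no_star _ h]
  simp

theorem altGo_zero (seg t : List Char) : altGo 0 seg t = some (seg, t) := rfl

-- A's slices when fourth_start_index = -1: text[f1:0] = '' and text[0:] = the whole text
theorem out_no4 (cs : List Char) (f1 : Int) :
    (String.ofList (PySem.Chars.slice cs (some f1) (some (-1 + 1))),
     String.ofList (PySem.Chars.slice cs (some (-1 + 1)) none)) = ("", String.ofList cs) := by
  have h1 : PySem.List.slice cs (some f1) (some 0) = [] := by
    rw [← List.length_eq_zero_iff]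
    simp [PySem.List.length_slice]
  have h2 : PySem.List.slice cs (some 0) none = cs := by
    simp [PySem.List.slice_zero_start, PySem.List.slice_none_none]
  norm_num [PySem.Chars.slice, h1, h2]

-- text[len u : ] of u ++ v is v
theorem slice_at_append (u v : List Char) :
    PySem.Chars.slice (u ++ v) (some ((u.length : Nat) : Int)) none = v := by
  rw [PySem.Chars.slice, PySem.List.slice_from_natCast, List.drop_left]

-- text[len u : len u + len m] of u ++ (m ++ v) is m
theorem slice_between (u m v : List Char) :
    PySem.Chars.slice (u ++ (m ++ v)) (some ((u.length : Nat) : Int))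
      (some ((u.length + m.length : Nat) : Int)) = m := by
  rw [PySem.Chars.slice, PySem.List.slice_natCast, List.drop_left, Nat.add_sub_cancel_left,
    List.take_left]

-- ===== VERDICT (by name: the statement is the Claim_ definition above) =====
theorem split_title_and_content_spec : Claim_equal_split_title_and_content := by
  intro text _
  unfold Spec_split_title_and_content
  simp only [split_title_and_content, split_title_and_content_alt, PySem.Str.slice]
  by_cases h0 : '*' ∈ text.toList
  · obtain ⟨p0, t1, hp0, hd0⟩ := exists_decomp _ h0
    rw [hd0, partition_star _ _ hp0]
    simp only [ite_true]
    by_cases h1 : '*' ∈ t1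
    · obtain ⟨p1, t2, hp1, hd1⟩ := exists_decomp _ h1
      rw [hd1, show (3 : Nat) = 2 + 1 from rfl, altGo_step 2 _ _ _ hp1]
      by_cases h2 : '*' ∈ t2
      · obtain ⟨p2, t3, hp2, hd2⟩ := exists_decomp _ h2
        rw [hd2, show (2 : Nat) = 1 + 1 from rfl, altGo_step 1 _ _ _ hp2]
        by_cases h3 : '*' ∈ t3
        · obtain ⟨p3, t4, hp3, hd3⟩ := exists_decomp _ h3
          rw [hd3, show (1 : Nat) = 0 + 1 from rfl, altGo_step 0 _ _ _ hp3, altGo_zero]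
          have hA : loopA (p0 ++ '*' :: (p1 ++ '*' :: (p2 ++ '*' :: (p3 ++ '*' :: t4)))) 0 (-1) (-1) 0
              = (((p0.length : Nat) : Int),
                 ((p0.length + p1.length + p2.length + p3.length + 3 : Nat) : Int)) := by
            rw [loopA_skip _ hp0, loopA_star0, loopA_skip _ hp1, loopA_star1,
              loopA_skip _ hp2, loopA_star2, loopA_skip _ hp3, loopA_star3]
            simp only [Prod.mk.injEq]
            constructor <;> push_cast <;> ring
          rw [hA]
          simp only []
          have hlenS : (['*'] ++ p1 ++ ['*'] ++ p2 ++ ['*'] ++ p3 ++ ['*']).length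
              = p1.length + p2.length + p3.length + 4 := by
            simp [List.length_append]; omega
          have hM : ((p0.length + p1.length + p2.length + p3.length + 3 : Nat) : Int) + 1
              = ((p0.length + (['*'] ++ p1 ++ ['*'] ++ p2 ++ ['*'] ++ p3 ++ ['*']).length : Nat) : Int) := by
            rw [hlenS]; push_cast; ring
          rw [hM]
          have hshape1 : p0 ++ '*' :: (p1 ++ '*' :: (p2 ++ '*' :: (p3 ++ '*' :: t4)))
              = p0 ++ ((['*'] ++ p1 ++ ['*'] ++ p2 ++ ['*'] ++ p3 ++ ['*']) ++ t4) := by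
            simp
          have hs1 := slice_between p0 (['*'] ++ p1 ++ ['*'] ++ p2 ++ ['*'] ++ p3 ++ ['*']) t4
          have hs2 := slice_at_append (p0 ++ (['*'] ++ p1 ++ ['*'] ++ p2 ++ ['*'] ++ p3 ++ ['*'])) t4
          rw [List.length_append] at hs2
          rw [List.append_assoc] at hs2
          rw [hshape1, hs1, hs2]
        · rw [altGo_stop _ _ _ h3]
          have hA : loopA (p0 ++ '*' :: (p1 ++ '*' :: (p2 ++ '*' :: t3))) 0 (-1) (-1) 0
              = (((p0.length : Nat) : Int), -1) := by
            rw [loopA_skip _ hp0, loopA_star0, loopA_skip _ hp1, loopA_star1,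
              loopA_skip _ hp2, loopA_star2, loopA_done _ h3]
            norm_num
          rw [hA]
          simp only []
          rw [out_no4]
          rw [show p0 ++ '*' :: (p1 ++ '*' :: (p2 ++ '*' :: t3)) = text.toList from by
            rw [hd0, hd1, hd2], String.ofList_toList]
      · rw [altGo_stop _ _ _ h2]
        have hA : loopA (p0 ++ '*' :: (p1 ++ '*' :: t2)) 0 (-1) (-1) 0
            = (((p0.length : Nat) : Int), -1) := by
          rw [loopA_skip _ hp0, loopA_star0, loopA_skip _ hp1, loopA_star1, loopA_done _ h2]
          norm_num
        rw [hA]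
        simp only []
        rw [out_no4]
        rw [show p0 ++ '*' :: (p1 ++ '*' :: t2) = text.toList from by rw [hd0, hd1],
          String.ofList_toList]
    · rw [show (3 : Nat) = 2 + 1 from rfl, altGo_stop _ _ _ h1]
      have hA : loopA (p0 ++ '*' :: t1) 0 (-1) (-1) 0 = (((p0.length : Nat) : Int), -1) := by
        rw [loopA_skip _ hp0, loopA_star0, loopA_done _ h1]
        norm_num
      rw [hA]
      simp only []
      rw [out_no4]
      rw [show p0 ++ '*' :: t1 = text.toList from hd0.symm, String.ofList_toList]
  · rw [partition_no_star _ h0]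
    simp only [Bool.false_eq_true, ite_false]
    rw [loopA_done _ h0]
    simp only []
    rw [out_no4, String.ofList_toList]
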